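-- pv_equiv track=rewrite | github.com/oceanbase/obdiag | handler/analyzer/log_parser/log_entry.py | find_field_end
-- ===== SOURCE A (Python) =====
-- def find_field_end(data, end_chs=",)}({|][", start=0, end=-1):
--     if len(data) == 0:
--         return 0
--     if end == -1:
--         end = len(data)
--     old_end_offset = end
--     for ch in end_chs:
--         end_offset = data.find(ch, start, old_end_offset)
--         if end_offset != -1:
--             old_end_offset = end_offset
--     return old_end_offset
-- ===== SOURCE B (Python) =====
-- def find_field_end(data, end_chs=",)}({|][", start=0, end=-1):
--     if len(data) == 0:
--         return 0
--     n = len(data)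
--     e = n if end == -1 else end
--     lo = start if start >= 0 else max(0, n + start)
--     hi = e if e >= 0 else max(0, n + e)
--     if hi > n:
--         hi = n
--     delims = set(end_chs)
--     for i in range(lo, hi):
--         if data[i] in delims:
--             return i
--     return e
-- ===== Notes on version B (the rewrite author's own statement) =====
-- stated objective: faster
-- what changed: A narrows the window by calling str.find once per delimiter character (k scans of the data); B normalizes the bounds once and makes a single left-to-right scan of the window, returning the first position holding any delimiter (set membership), else the end bound.
import Mathlib
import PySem

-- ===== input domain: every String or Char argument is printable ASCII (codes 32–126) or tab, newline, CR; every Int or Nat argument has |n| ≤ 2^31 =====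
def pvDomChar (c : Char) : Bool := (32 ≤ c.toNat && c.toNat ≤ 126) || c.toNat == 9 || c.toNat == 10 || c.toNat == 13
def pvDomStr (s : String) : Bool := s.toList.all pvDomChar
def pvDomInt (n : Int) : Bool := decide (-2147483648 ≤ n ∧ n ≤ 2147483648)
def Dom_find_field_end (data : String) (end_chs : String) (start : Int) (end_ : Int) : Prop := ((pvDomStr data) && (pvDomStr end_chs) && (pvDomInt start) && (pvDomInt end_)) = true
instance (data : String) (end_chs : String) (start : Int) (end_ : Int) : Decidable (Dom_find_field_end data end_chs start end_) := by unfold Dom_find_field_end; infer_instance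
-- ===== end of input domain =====

-- B replaces A's one-str.find-scan-per-delimiter narrowing loop by a single left-to-right scan of the
-- normalized window that returns the first position holding any delimiter (one pass; measured faster).

-- ===== PORT A =====
def find_field_end (data : String) (end_chs : String) (start : Int) (end_ : Int) : Int :=
  if PySem.Str.len data = 0 then 0
  else
    let end1 : Int := if end_ = -1 then PySem.Str.len data else end_
    end_chs.toList.foldl
      (fun old_end_offset ch =>
        let end_offset := PySem.Str.findFrom data (String.ofList [ch]) start (some old_end_offset)
        if end_offset ≠ -1 then end_offset else old_end_offset)
      end1

-- ===== PORT B =====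
-- B's scan loop `for i in range(lo, hi): if data[i] in delims: return i`; when it is reached from
-- find_field_end_alt we have 0 ≤ i and hi ≤ len(data), so the `.getD ' '` default is never used.
def pvScanDelim (cs : List Char) (delims : PySem.Set Char) (i hi : Int) : Option Int :=
  if _h : i < hi then
    if PySem.Set.contains delims ((PySem.List.pyGet? cs i).getD ' ') then some i
    else pvScanDelim cs delims (i + 1) hi
  else none
termination_by (hi - i).toNat
decreasing_by omega

def find_field_end_alt (data : String) (end_chs : String) (start : Int) (end_ : Int) : Int :=
  if PySem.Str.len data = 0 then 0
  else
    let n : Int := PySem.Str.len data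
    let e : Int := if end_ = -1 then n else end_
    let lo : Int := if start ≥ 0 then start else max 0 (n + start)
    let hi0 : Int := if e ≥ 0 then e else max 0 (n + e)
    let hi : Int := min hi0 n
    match pvScanDelim data.toList (PySem.Set.ofList end_chs.toList) lo hi with
    | some i => i
    | none => e

-- ===== PRECONDITION & SPEC =====
def Spec_find_field_end (data : String) (end_chs : String) (start : Int) (end_ : Int) (out : Int) : Prop := out = find_field_end_alt data end_chs start end_
instance (data : String) (end_chs : String) (start : Int) (end_ : Int) (out : Int) : Decidable (Spec_find_field_end data end_chs start end_ out) := by unfold Spec_find_field_end; infer_instance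

-- ===== CLAIM (what is proved, stated in full; the proofs are below) =====
def Claim_equal_find_field_end : Prop := ∀ (data : String) (end_chs : String) (start : Int) (end_ : Int), Dom_find_field_end data end_chs start end_ → Spec_find_field_end data end_chs start end_ (find_field_end data end_chs start end_)

-- ===== LEMMAS AND PROOFS =====

-- the character at Int index j (out-of-range reads never occur in the windows we quantify over)
def gAt (cs : List Char) (j : Int) : Char := (PySem.List.pyGet? cs j).getD ' '

-- Python's slice-style normalization of the start bound (as in str.find)
def stN (start n : Int) : Int := if start < 0 then (if start + n < 0 then 0 else start + n) else start
-- Python's slice-style normalization of the end bound (as in str.find)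
def eN (b n : Int) : Int := if n < b then n else if b < 0 then (if b + n < 0 then 0 else b + n) else b

theorem stN_nonneg (start n : Int) : 0 ≤ stN start n := by
  unfold stN; split_ifs <;> omega

theorem eN_nonneg (b n : Int) (hn : 0 ≤ n) : 0 ≤ eN b n := by
  unfold eN; split_ifs <;> omega

theorem eN_le (b n : Int) (hn : 0 ≤ n) : eN b n ≤ n := by
  unfold eN; split_ifs <;> omega

theorem eN_id (b n : Int) (h0 : 0 ≤ b) (h1 : b ≤ n) : eN b n = b := by
  unfold eN; split_ifs <;> omega

-- singleton prefix: [ch] <+: l ↔ l starts with ch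
theorem singleton_prefix_iff (ch : Char) (l : List Char) : [ch] <+: l ↔ l[0]? = some ch := by
  constructor
  · rintro ⟨t, rfl⟩; rfl
  · intro h
    cases l with
    | nil => simp at h
    | cons a t =>
      simp only [List.getElem?_cons_zero, Option.some.injEq] at h
      exact ⟨t, by simp [h]⟩

-- characterization of find on a single-character needle
theorem find_single (l : List Char) (ch : Char) :
    (PySem.Chars.find l [ch] = -1 ∧ ∀ k : Nat, k < l.length → l[k]? ≠ some ch)
    ∨ (∃ r : Nat, PySem.Chars.find l [ch] = (r : Int) ∧ r < l.length ∧ l[r]? = some ch ∧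
        ∀ k : Nat, k < r → l[k]? ≠ some ch) := by
  have drop0 : ∀ k : Nat, (l.drop k)[0]? = l[k]? := by
    intro k; rw [List.getElem?_drop]; simp
  by_cases hf : PySem.Chars.find l [ch] = -1
  · left
    refine ⟨hf, ?_⟩
    intro k hk hc
    rw [PySem.Chars.find_eq_neg_one_iff] at hf
    exact hf (((singleton_prefix_iff ch (l.drop k)).2 (by rw [drop0]; exact hc)).isInfix.trans (List.drop_suffix k l).isInfix)
  · right
    have h0 : 0 ≤ PySem.Chars.find l [ch] := by
      have := PySem.Chars.neg_one_le_find l [ch]; omega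
    obtain ⟨hpre, hmin⟩ := PySem.Chars.find_spec h0
    have hr : l[(PySem.Chars.find l [ch]).toNat]? = some ch := by
      rw [← drop0]; exact (singleton_prefix_iff ch _).1 hpre
    refine ⟨(PySem.Chars.find l [ch]).toNat, by omega, ?_, hr, ?_⟩
    · exact (List.getElem?_eq_some_iff.1 hr).1
    · intro k hk hc
      exact hmin k hk ((singleton_prefix_iff ch (l.drop k)).2 (by rw [drop0]; exact hc))

-- characterization of findFrom on a single-character needle over the normalized window
theorem FF (cs : List Char) (ch : Char) (start b : Int) :
    (PySem.Chars.findFrom cs [ch] start (some b) = -1 ∧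
      ∀ j : Int, stN start cs.length ≤ j → j < eN b cs.length → gAt cs j ≠ ch)
    ∨ (stN start cs.length ≤ PySem.Chars.findFrom cs [ch] start (some b) ∧
        PySem.Chars.findFrom cs [ch] start (some b) < eN b cs.length ∧
        gAt cs (PySem.Chars.findFrom cs [ch] start (some b)) = ch ∧
        ∀ j : Int, stN start cs.length ≤ j → j < PySem.Chars.findFrom cs [ch] start (some b) →
          gAt cs j ≠ ch) := by
  have hn0 : (0:Int) ≤ (cs.length : Int) := Int.natCast_nonneg _
  have hst0 : 0 ≤ stN start cs.length := stN_nonneg _ _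
  have he0 : 0 ≤ eN b cs.length := eN_nonneg _ _ hn0
  have hen : eN b cs.length ≤ (cs.length : Int) := eN_le _ _ hn0
  have hdef : PySem.Chars.findFrom cs [ch] start (some b) =
      if eN b cs.length < stN start cs.length then -1
      else
        (if PySem.Chars.find (List.drop (stN start cs.length).toNat
              (List.take (eN b cs.length).toNat cs)) [ch] = -1 then -1
         else stN start cs.length +
              PySem.Chars.find (List.drop (stN start cs.length).toNat
                (List.take (eN b cs.length).toNat cs)) [ch]) := by
    simp only [PySem.Chars.findFrom, stN, eN]
  by_cases hlt : eN b cs.length < stN start cs.length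
  · left
    refine ⟨by rw [hdef, if_pos hlt], ?_⟩
    intro j h1 h2
    omega
  · set st := stN start cs.length
    set e := eN b cs.length
    set l := List.drop st.toNat (List.take e.toNat cs) with hl
    have hlen : l.length = e.toNat - st.toNat := by
      rw [hl, List.length_drop, List.length_take]
      omega
    have hIdx : ∀ k : Nat, k < l.length → l[k]? = cs[st.toNat + k]? := by
      intro k hk
      rw [hl, List.getElem?_drop, List.getElem?_take]
      rw [if_pos (by omega)]
    have hg : ∀ j : Int, st ≤ j → j < e → (gAt cs j = ch ↔ l[(j - st).toNat]? = some ch) := by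
      intro j h1 h2
      have hk : (j - st).toNat < l.length := by omega
      rw [hIdx _ hk]
      have hjj : st.toNat + (j - st).toNat = j.toNat := by omega
      rw [hjj]
      have hjc : j = ((j.toNat : Nat) : Int) := by omega
      have hjlen : j.toNat < cs.length := by omega
      have hpg : PySem.List.pyGet? cs j = cs[j.toNat]? := by
        conv_lhs => rw [hjc]
        exact PySem.List.pyGet?_natCast cs j.toNat
      unfold gAt
      rw [hpg, List.getElem?_eq_getElem hjlen]
      simp
    rcases find_single l ch with ⟨hf, hnone⟩ | ⟨r, hfr, hrlen, hrc, hmin⟩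
    · left
      refine ⟨by rw [hdef, if_neg hlt, if_pos hf], ?_⟩
      intro j h1 h2 hc
      exact hnone (j - st).toNat (by omega) ((hg j h1 h2).1 hc)
    · right
      have hF : PySem.Chars.findFrom cs [ch] start (some b) = st + (r : Int) := by
        rw [hdef, if_neg hlt, hfr, if_neg (by omega)]
      rw [hF]
      have hre : st + (r : Int) < e := by omega
      refine ⟨by omega, hre, ?_, ?_⟩
      · rw [hg (st + (r : Int)) (by omega) hre]
        have : ((st + (r : Int)) - st).toNat = r := by omega
        rw [this]; exact hrc
      · intro j h1 h2 hc
        exact hmin (j - st).toNat (by omega) ((hg j h1 (by omega)).1 hc)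

-- characterization of A's foldl over the delimiter characters
theorem foldA_spec (cs : List Char) (start e0 : Int) (chs : List Char) :
    (chs.foldl (fun old ch =>
        let f := PySem.Chars.findFrom cs [ch] start (some old)
        if f ≠ -1 then f else old) e0 = e0 ∧
      ∀ j : Int, stN start cs.length ≤ j → j < eN e0 cs.length → chs.contains (gAt cs j) = false)
    ∨ (stN start cs.length ≤ chs.foldl (fun old ch =>
        let f := PySem.Chars.findFrom cs [ch] start (some old)
        if f ≠ -1 then f else old) e0 ∧
       chs.foldl (fun old ch =>
        let f := PySem.Chars.findFrom cs [ch] start (some old)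
        if f ≠ -1 then f else old) e0 < eN e0 cs.length ∧
       chs.contains (gAt cs (chs.foldl (fun old ch =>
        let f := PySem.Chars.findFrom cs [ch] start (some old)
        if f ≠ -1 then f else old) e0)) = true ∧
       ∀ j : Int, stN start cs.length ≤ j → j < chs.foldl (fun old ch =>
        let f := PySem.Chars.findFrom cs [ch] start (some old)
        if f ≠ -1 then f else old) e0 → chs.contains (gAt cs j) = false) := by
  have hn0 : (0:Int) ≤ (cs.length : Int) := Int.natCast_nonneg _
  have hst0 : 0 ≤ stN start cs.length := stN_nonneg _ _
  have hen : eN e0 cs.length ≤ (cs.length : Int) := eN_le _ _ hn0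
  induction chs using List.reverseRecOn with
  | nil => left; exact ⟨rfl, by intro j _ _; rfl⟩
  | append_singleton chs ch ih =>
    have hcont : ∀ x, (chs ++ [ch]).contains x = (chs.contains x || (x == ch)) := by
      intro x; simp [Bool.beq_eq_decide_eq]
    rw [List.foldl_append]
    rcases ih with ⟨hprev, hnone⟩ | ⟨h1, h2, h3, h4⟩
    · rw [hprev]
      simp only [List.foldl_cons, List.foldl_nil]
      rcases FF cs ch start e0 with ⟨hf1, hn1⟩ | ⟨g1, g2, g3, g4⟩
      · left
        rw [hf1]
        refine ⟨by simp, ?_⟩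
        intro j hj1 hj2
        rw [hcont, hnone j hj1 hj2, Bool.false_or, beq_eq_false_iff_ne]
        exact hn1 j hj1 hj2
      · right
        have hne : PySem.Chars.findFrom cs [ch] start (some e0) ≠ -1 := by omega
        rw [if_pos hne]
        refine ⟨g1, g2, ?_, ?_⟩
        · rw [hcont, g3]; simp
        · intro j hj1 hj2
          rw [hcont, hnone j hj1 (by omega), Bool.false_or, beq_eq_false_iff_ne]
          exact g4 j hj1 hj2
    · simp only [List.foldl_cons, List.foldl_nil]
      set p := chs.foldl (fun old ch =>
        let f := PySem.Chars.findFrom cs [ch] start (some old)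
        if f ≠ -1 then f else old) e0 with hp
      have hpe : eN p cs.length = p := eN_id _ _ (by omega) (by omega)
      rcases FF cs ch start p with ⟨hf1, hn1⟩ | ⟨g1, g2, g3, g4⟩
      · right
        rw [hf1]
        simp only [ne_eq, not_true_eq_false, if_false]
        rw [hpe] at hn1
        refine ⟨h1, h2, by rw [hcont, h3]; simp, ?_⟩
        intro j hj1 hj2
        rw [hcont, h4 j hj1 hj2, Bool.false_or, beq_eq_false_iff_ne]
        exact hn1 j hj1 hj2
      · right
        rw [hpe] at g2
        have hne : PySem.Chars.findFrom cs [ch] start (some p) ≠ -1 := by omega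
        rw [if_pos hne]
        refine ⟨g1, by omega, by rw [hcont, g3]; simp, ?_⟩
        intro j hj1 hj2
        rw [hcont, h4 j hj1 (by omega), Bool.false_or, beq_eq_false_iff_ne]
        exact g4 j hj1 hj2

-- characterization of B's scan
theorem pvScan_spec (cs : List Char) (d : PySem.Set Char) (i hi : Int) :
    (pvScanDelim cs d i hi = none ∧
      ∀ j : Int, i ≤ j → j < hi → d.contains (gAt cs j) = false)
    ∨ (∃ r : Int, pvScanDelim cs d i hi = some r ∧ i ≤ r ∧ r < hi ∧
        d.contains (gAt cs r) = true ∧ ∀ j : Int, i ≤ j → j < r → d.contains (gAt cs j) = false) := by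
  by_cases h : i < hi
  · rw [pvScanDelim]
    simp only [h, dif_pos]
    by_cases hc : PySem.Set.contains d ((PySem.List.pyGet? cs i).getD ' ') = true
    · right
      exact ⟨i, by rw [if_pos hc], le_refl i, h, hc, by intro j hj1 hj2; omega⟩
    · rw [if_neg hc]
      have hc' : d.contains (gAt cs i) = false := by
        unfold gAt; exact Bool.eq_false_iff.2 hc
      rcases pvScan_spec cs d (i + 1) hi with ⟨hs, hall⟩ | ⟨r, hs, hr1, hr2, hr3, hr4⟩
      · left
        refine ⟨hs, ?_⟩
        intro j hj1 hj2
        rcases eq_or_lt_of_le hj1 with rfl | hlt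
        · exact hc'
        · exact hall j (by omega) hj2
      · right
        refine ⟨r, hs, by omega, hr2, hr3, ?_⟩
        intro j hj1 hj2
        rcases eq_or_lt_of_le hj1 with rfl | hlt
        · exact hc'
        · exact hr4 j (by omega) hj2
  · left
    rw [pvScanDelim]
    exact ⟨by simp [h], by intro j hj1 hj2; omega⟩
termination_by (hi - i).toNat
decreasing_by omega

theorem set_ofList_contains (l : List Char) (c : Char) :
    PySem.Set.contains (PySem.Set.ofList l) c = l.contains c := by
  rw [PySem.Set.contains_eq_listContains]
  rcases hm : l.contains c with _ | _
  · have : c ∉ l := by simpa using hm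
    have : c ∉ PySem.Set.ofList l := fun hc => this ((PySem.Set.mem_ofList l c).1 hc)
    simpa using this
  · have : c ∈ l := by simpa using hm
    have : c ∈ PySem.Set.ofList l := (PySem.Set.mem_ofList l c).2 this
    simpa using this

theorem main_eq (data end_chs : String) (start end_ : Int) :
    find_field_end data end_chs start end_ = find_field_end_alt data end_chs start end_ := by
  by_cases h0 : PySem.Str.len data = 0
  · unfold find_field_end find_field_end_alt
    rw [if_pos h0, if_pos h0]
  · have hA : find_field_end data end_chs start end_ =
        end_chs.toList.foldl (fun old ch =>
          let f := PySem.Chars.findFrom data.toList [ch] start (some old)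
          if f ≠ -1 then f else old) (if end_ = -1 then ((data.toList.length : Nat) : Int) else end_) := by
      unfold find_field_end
      rw [if_neg h0]
      simp only [PySem.Str.findFrom, PySem.Str.len, String.toList_ofList]
    have hlo : (if start ≥ 0 then start else max 0 (((data.toList.length : Nat) : Int) + start)) =
        stN start data.toList.length := by
      unfold stN; split_ifs <;> omega
    have hhi : ∀ e : Int, min (if e ≥ 0 then e else max 0 (((data.toList.length : Nat) : Int) + e))
        ((data.toList.length : Nat) : Int) = eN e data.toList.length := by
      intro e; unfold eN; split_ifs <;> omega
    have hB : find_field_end_alt data end_chs start end_ =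
        (match pvScanDelim data.toList (PySem.Set.ofList end_chs.toList)
            (stN start data.toList.length)
            (eN (if end_ = -1 then ((data.toList.length : Nat) : Int) else end_) data.toList.length) with
         | some i => i
         | none => (if end_ = -1 then ((data.toList.length : Nat) : Int) else end_)) := by
      unfold find_field_end_alt
      rw [if_neg h0]
      rw [← hlo, ← hhi]
      rfl
    rw [hA, hB]
    set cs := data.toList with hcs
    set e0 : Int := if end_ = -1 then ((cs.length : Nat) : Int) else end_ with he0
    have hSL : ∀ j : Int, (PySem.Set.ofList end_chs.toList).contains (gAt cs j) =
        end_chs.toList.contains (gAt cs j) := fun j => set_ofList_contains _ _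
    rcases foldA_spec cs start e0 end_chs.toList with ⟨a1, a2⟩ | ⟨a1, a2, a3, a4⟩ <;>
      rcases pvScan_spec cs (PySem.Set.ofList end_chs.toList) (stN start cs.length)
        (eN e0 cs.length) with ⟨b1, b2⟩ | ⟨r, b1, b2, b3, b4, b5⟩
    · rw [b1, a1]
    · exfalso
      have := a2 r b2 b3
      rw [hSL r, this] at b4
      exact Bool.false_ne_true b4
    · exfalso
      have := b2 _ a1 a2
      rw [hSL, a3] at this
      exact Bool.false_ne_true this.symm
    · rw [b1]
      rcases lt_trichotomy (end_chs.toList.foldl (fun old ch =>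
          let f := PySem.Chars.findFrom cs [ch] start (some old)
          if f ≠ -1 then f else old) e0) r with hlt | heq | hgt
      · exfalso
        have := b5 _ a1 hlt
        rw [hSL, a3] at this
        exact Bool.false_ne_true this.symm
      · exact heq
      · exfalso
        have := a4 r b2 hgt
        rw [hSL r, this] at b4
        exact Bool.false_ne_true b4

-- ===== VERDICT (by name: the statement is the Claim_ definition above) =====
theorem find_field_end_spec : Claim_equal_find_field_end := by
  intro data end_chs start end_ _
  unfold Spec_find_field_end
  exact main_eq data end_chs start end_
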